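-- pv_equiv track=rewrite | github.com/kimSooHyun950921/algoritm | soohyun/python/baekjoon/0714/14890/1.py | count_slope_col
-- ===== SOURCE A (Python) =====
-- def count_slope_col(N, L, stairs):
--     answer = 0
--     for row in range(N):
--         count = 1
--         left = 101
--         previous = -1
--         is_slope = True
--         for col in range(N):
--             current = stairs[row][col]
--
--             if previous != -1:
--                 if abs(previous - current) == 1:
--                     if left != 101 and left > 0:
--                         is_slope = False
--                         break
--
--                     if previous > current:
--                         left = L
--                         left -= 1
--                         count = 0
--                     else:
--                         if count < L:
--                             is_slope = False
--                             break
--                         count = 1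
--                 elif abs(previous - current) == 0:
--                     if left != 101 and left > 0:
--                         left -= 1
--                     else:
--                         count += 1
--                 else:
--                     is_slope = False
--                     break
--             previous = current
--         if left != 101 and left > 0:
--             is_slope = False
--         if is_slope:
--             answer += 1
--     return answer
-- ===== SOURCE B (Python) =====
-- def count_slope_col(N, L, stairs):
--     # Run-length-encoding approach: compress each row's first N cells into
--     # (height, run_length) pairs, then check per run that it is long enough
--     # for the ramps reserved on it: L cells when the step into it goes down,
--     # plus L cells when the step out of it goes up.
--     answer = 0
--     for r in range(N):
--         runs = []
--         for h in stairs[r][:N]: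
--             if runs and runs[-1][0] == h:
--                 runs[-1][1] += 1
--             else:
--                 runs.append([h, 1])
--         ok = True
--         down = False  # did the step into the current run go down?
--         i = 0
--         while i < len(runs):
--             h, length = runs[i]
--             need = L if down else 0
--             if i + 1 < len(runs):
--                 nh = runs[i + 1][0]
--                 if abs(h - nh) != 1:
--                     ok = False
--                     break
--                 if nh > h:
--                     need += L
--                 down = h > nh
--             if length < need:
--                 ok = False
--                 break
--             i += 1
--         if ok:
--             answer += 1
--     return answer
-- ===== Notes on version B (the rewrite author's own statement) =====
-- stated objective: alternative
-- what changed: Replaces A's per-cell count/left state machine (with break and sentinel values) by compressing each row into (height, run-length) pairs once and checking a simple arithmetic reservation condition per run: a run needs L cells if the step into it goes down plus L cells if the step out of it goes up.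
-- outside the precondition, e.g. on count_slope_col(2, 2, [[-1, 0], [-1, 0]]): A returns 2, B returns 0; on count_slope_col(3, 103, [[2, 1, 1], [1, 1, 1], [1, 1, 1]]): A returns 3, B returns 2
import Mathlib
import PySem

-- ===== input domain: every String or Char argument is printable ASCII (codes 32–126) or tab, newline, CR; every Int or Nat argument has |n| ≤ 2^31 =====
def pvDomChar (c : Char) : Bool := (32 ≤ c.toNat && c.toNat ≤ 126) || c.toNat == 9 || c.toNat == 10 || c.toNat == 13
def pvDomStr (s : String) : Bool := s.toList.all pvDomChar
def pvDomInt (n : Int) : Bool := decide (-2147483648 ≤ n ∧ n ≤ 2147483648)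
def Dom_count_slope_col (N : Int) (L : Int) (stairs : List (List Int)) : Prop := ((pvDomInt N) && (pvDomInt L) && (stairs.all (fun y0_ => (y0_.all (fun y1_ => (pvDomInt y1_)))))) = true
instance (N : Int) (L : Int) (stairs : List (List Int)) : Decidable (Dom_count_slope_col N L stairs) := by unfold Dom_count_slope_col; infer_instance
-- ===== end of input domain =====

-- B replaces A's per-cell count/left state machine by run-length-encoding each row
-- and checking a per-run arithmetic reservation condition (objective: alternative).

-- ===== PORT A =====
-- loop body of A's inner 'for col' loop; state = (count, left, previous, is_slope, broken)
def aInner (L : Int) (st : Int × Int × Int × Bool × Bool) (current : Int) : Int × Int × Int × Bool × Bool :=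
  match st with
  | (count, left, previous, is_slope, broken) =>
    if broken then (count, left, previous, is_slope, broken)
    else if previous ≠ -1 then
      if (previous - current).natAbs = 1 then
        if left ≠ 101 ∧ 0 < left then (count, left, previous, false, true)
        else if previous > current then (0, L - 1, current, is_slope, false)
        else if count < L then (count, left, previous, false, true)
        else (1, left, current, is_slope, false)
      else if (previous - current).natAbs = 0 then
        if left ≠ 101 ∧ 0 < left then (count, left - 1, current, is_slope, false)
        else (count + 1, left, current, is_slope, false)
      else (count, left, previous, false, true)
    else (count, left, current, is_slope, false)

def count_slope_col (N : Int) (L : Int) (stairs : List (List Int)) : Int :=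
  (PySem.List.pyRange 0 N 1).foldl (fun answer row =>
    let fin := (PySem.List.pyRange 0 N 1).foldl
      (fun st col => aInner L st (PySem.List.pyGetD (PySem.List.pyGetD stairs row []) col 0))
      ((1 : Int), (101 : Int), (-1 : Int), true, false)
    match fin with
    | (_, left, _, is_slope, _) =>
      let is_slope := if left ≠ 101 ∧ 0 < left then false else is_slope
      if is_slope then answer + 1 else answer) 0

-- ===== PORT B =====
-- run-length encoding step (runs kept reversed: head = last run, as Source B mutates runs[-1])
def bRle (acc : List (Int × Int)) (h : Int) : List (Int × Int) :=
  match acc with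
  | (h', r) :: rest => if h' = h then (h', r + 1) :: rest else (h, 1) :: (h', r) :: rest
  | [] => [(h, 1)]

-- Source B's 'while i < len(runs)' look-ahead loop as structural recursion on the runs list
def bCheck (L : Int) (down : Bool) : List (Int × Int) → Bool
  | [] => true
  | (h, len) :: rest =>
    let need := if down then L else 0
    match rest with
    | [] => !(len < need)
    | (nh, _) :: _ =>
      if (h - nh).natAbs ≠ 1 then false
      else
        let need := need + (if nh > h then L else 0)
        if len < need then false else bCheck L (h > nh) rest

def count_slope_col_alt (N : Int) (L : Int) (stairs : List (List Int)) : Int :=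
  (PySem.List.pyRange 0 N 1).foldl (fun answer r =>
    let runs := ((PySem.List.slice (PySem.List.pyGetD stairs r []) none (some N)).foldl bRle []).reverse
    if bCheck L false runs then answer + 1 else answer) 0

-- ===== PRECONDITION & SPEC =====
-- Pre_ excludes (i) shapes where A indexes out of range (IndexError): fewer than N rows,
-- or a scanned row shorter than N; and two sentinel collisions where A's returned value is
-- an accident of its implementation: (ii) the height -1 inside the scanned window (A's
-- 'previous = -1' sentinel silently skips the comparison after such a cell), and
-- (iii) 102 ≤ L ≤ 101 + N (after a down-step 'left = L - 1 - #steps' can hit A's 101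
-- sentinel, making a pending ramp look completed).
def Pre_count_slope_col (N : Int) (L : Int) (stairs : List (List Int)) : Prop :=
  ¬(102 ≤ L ∧ L ≤ 101 + N) ∧
  N ≤ (stairs.length : Int) ∧
  ∀ row ∈ stairs.take N.toNat, N ≤ (row.length : Int) ∧ (-1 : Int) ∉ row.take N.toNat

instance (N : Int) (L : Int) (stairs : List (List Int)) : Decidable (Pre_count_slope_col N L stairs) := by
  unfold Pre_count_slope_col; infer_instance

def pvWitness_count_slope_col : Int × Int × List (List Int) := (2, 1, [[1, 2], [3, 3]])

def Spec_count_slope_col (N : Int) (L : Int) (stairs : List (List Int)) (out : Int) : Prop := out = count_slope_col_alt N L stairs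
instance (N : Int) (L : Int) (stairs : List (List Int)) (out : Int) : Decidable (Spec_count_slope_col N L stairs out) := by unfold Spec_count_slope_col; infer_instance

-- ===== CLAIM (what is proved, stated in full; the proofs are below) =====
def Claim_equal_count_slope_col : Prop := ∀ (N : Int) (L : Int) (stairs : List (List Int)), Dom_count_slope_col N L stairs → Pre_count_slope_col N L stairs → Spec_count_slope_col N L stairs (count_slope_col N L stairs)

-- ===== LEMMAS AND PROOFS =====

-- abstract left-to-right RLE used by the proofs
def lrleabs : Int → Nat → List Int → List (Int × Nat)
  | h, r, [] => [(h, r)]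
  | h, r, x :: t => if x = h then lrleabs h (r + 1) t else (h, r) :: lrleabs x 1 t

def flatR : List (Int × Nat) → List Int
  | [] => []
  | (h, r) :: R => List.replicate r h ++ flatR R

def toRuns (R : List (Int × Nat)) : List (Int × Int) := R.map (fun p => (p.1, (p.2 : Int)))

-- per-row final check of A (Python's post-loop 'if left != 101 and left > 0')
def finalize (st : Int × Int × Int × Bool × Bool) : Bool :=
  match st with
  | (_, left, _, is_slope, _) => if left ≠ 101 ∧ 0 < left then false else is_slope

-- L1: the foldl of bRle computes lrleabs (reversed)
theorem rle_fold (c : List Int) : ∀ (h : Int) (r : Nat) (acc : List (Int × Int)),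
    List.foldl bRle ((h, (r : Int)) :: acc) c = (toRuns (lrleabs h r c)).reverse ++ acc := by
  induction c with
  | nil => intro h r acc; simp [lrleabs, toRuns]
  | cons x t ih =>
    intro h r acc
    by_cases hx : x = h
    · subst hx
      simp only [List.foldl_cons, bRle, lrleabs, if_true, eq_self_iff_true]
      have h1 : ((r : Int) + 1) = ((r + 1 : Nat) : Int) := by push_cast; ring
      simp only [if_true, h1, ih]
    · simp only [List.foldl_cons, bRle, if_neg (by omega : ¬ h = x), lrleabs, if_neg hx]
      rw [show ((1:Int)) = ((1 : Nat) : Int) by norm_num, ih]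
      simp [toRuns]

-- L2: lrleabs really is an RLE of its input
theorem lrleabs_flat (c : List Int) : ∀ (h : Int) (r : Nat),
    flatR (lrleabs h r c) = List.replicate r h ++ c := by
  induction c with
  | nil => intro h r; simp [lrleabs, flatR]
  | cons x t ih =>
    intro h r
    by_cases hx : x = h
    · subst hx
      simp only [lrleabs, if_true, ih]
      rw [List.replicate_succ']
      simp
    · simp only [lrleabs, if_neg hx, flatR, ih]
      simp

theorem lrleabs_head (c : List Int) : ∀ (h : Int) (r : Nat),
    ∃ r' R, lrleabs h r c = (h, r') :: R ∧ r ≤ r' := by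
  induction c with
  | nil => intro h r; exact ⟨r, [], rfl, le_refl _⟩
  | cons x t ih =>
    intro h r
    by_cases hx : x = h
    · subst hx
      obtain ⟨r', R, hR, hle⟩ := ih x (r+1)
      exact ⟨r', R, by simp [lrleabs, hR], by omega⟩
    · exact ⟨r, lrleabs x 1 t, by simp [lrleabs, hx], le_refl _⟩

-- L3: well-formedness of lrleabs
theorem lrleabs_pos (c : List Int) : ∀ (h : Int) (r : Nat), 1 ≤ r →
    ∀ p ∈ lrleabs h r c, 1 ≤ p.2 := by
  induction c with
  | nil => intro h r hr p hp; simp [lrleabs] at hp; subst hp; exact hr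
  | cons x t ih =>
    intro h r hr p hp
    by_cases hx : x = h
    · subst hx; simp only [lrleabs, if_pos rfl] at hp; exact ih x (r+1) (by omega) p hp
    · simp only [lrleabs, if_neg hx, List.mem_cons] at hp
      rcases hp with h1 | h2
      · subst h1; exact hr
      · exact ih x 1 (le_refl _) p h2

theorem lrleabs_mem_fst (c : List Int) : ∀ (h : Int) (r : Nat),
    ∀ p ∈ lrleabs h r c, p.1 = h ∨ p.1 ∈ c := by
  induction c with
  | nil => intro h r p hp; simp [lrleabs] at hp; subst hp; left; rfl
  | cons x t ih =>
    intro h r p hp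
    by_cases hx : x = h
    · subst hx
      simp only [lrleabs, if_pos rfl] at hp
      rcases ih x (r+1) p hp with h1 | h2
      · right; simp [h1]
      · right; simp [h2]
    · simp only [lrleabs, if_neg hx, List.mem_cons] at hp
      rcases hp with h1 | h2
      · subst h1; left; rfl
      · rcases ih x 1 p h2 with h1 | h3
        · right; simp [h1]
        · right; simp [h3]

theorem lrleabs_chain (c : List Int) : ∀ (h : Int) (r : Nat),
    List.IsChain (fun p q : Int × Nat => p.1 ≠ q.1) (lrleabs h r c) := by
  induction c with
  | nil => intro h r; simp [lrleabs]
  | cons x t ih =>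
    intro h r
    by_cases hx : x = h
    · subst hx; simpa [lrleabs] using ih x (r+1)
    · simp only [lrleabs, if_neg hx]
      obtain ⟨r', R, hR, _⟩ := lrleabs_head t x 1
      rw [hR]
      have := ih x 1
      rw [hR] at this
      exact this.cons (by intro y hy; simp at hy; subst hy; simpa using (Ne.symm hx))

-- K0: a broken state absorbs
theorem foldl_broken (L : Int) (l : List Int) (count left previous : Int) :
    l.foldl (aInner L) (count, left, previous, false, true) = (count, left, previous, false, true) := by
  induction l with
  | nil => rfl
  | cons x t ih => simpa [aInner] using ih

-- K1: equal cells with no pending ramp just count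
theorem aInner_eq_np (L count left h : Int) (hh : h ≠ -1) (hnp : left = 101 ∨ left ≤ 0) :
    aInner L (count, left, h, true, false) h = (count + 1, left, h, true, false) := by
  simp only [aInner]
  rw [if_neg (by simp), if_pos hh, if_neg (by simp), if_pos (by simp),
      if_neg (by rcases hnp with h1 | h1 <;> simp [h1] <;> omega)]

theorem foldl_eq_np (L : Int) (k : Nat) : ∀ (count left h : Int), h ≠ -1 →
    (left = 101 ∨ left ≤ 0) →
    (List.replicate k h).foldl (aInner L) (count, left, h, true, false)
      = (count + k, left, h, true, false) := by
  induction k with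
  | zero => intro count left h _ _; simp
  | succ k ih =>
    intro count left h hh hnp
    rw [List.replicate_succ, List.foldl_cons, aInner_eq_np L count left h hh hnp, ih _ _ _ hh hnp]
    simp [Prod.mk.injEq]
    push_cast; omega

-- K2: equal cells with a pending ramp, small left (≤ 100): decrement then count
theorem aInner_eq_pend (L count left h : Int) (hh : h ≠ -1) (h0 : 0 < left) (h1 : left ≤ 100) :
    aInner L (count, left, h, true, false) h = (count, left - 1, h, true, false) := by
  simp only [aInner]
  rw [if_neg (by simp), if_pos hh, if_neg (by simp), if_pos (by simp),
      if_pos (by exact ⟨by omega, h0⟩)]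

theorem foldl_eq_pend (L : Int) (k : Nat) : ∀ (count left h : Int), h ≠ -1 →
    0 ≤ left → left ≤ 100 →
    (List.replicate k h).foldl (aInner L) (count, left, h, true, false)
      = (count + ((k : Int) - min (k : Int) left), left - min (k : Int) left, h, true, false) := by
  induction k with
  | zero =>
    intro count left h _ _ _
    simp [Prod.mk.injEq]
    omega
  | succ k ih =>
    intro count left h hh h0 h1
    rcases lt_or_ge 0 left with hpos | hz
    · rw [List.replicate_succ, List.foldl_cons, aInner_eq_pend L count left h hh hpos h1,
          ih _ _ _ hh (by omega) (by omega)]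
      simp [Prod.mk.injEq]
      push_cast; omega
    · have hl : left = 0 := by omega
      subst hl
      rw [List.replicate_succ, List.foldl_cons, aInner_eq_np L count 0 h hh (Or.inr le_rfl),
          foldl_eq_np L k _ _ _ hh (Or.inr le_rfl)]
      simp [Prod.mk.injEq]
      push_cast; omega

-- K3: equal cells with a huge pending left (≥ 102 + k): pure decrement, never hits 101
theorem aInner_eq_big (L count left h : Int) (hh : h ≠ -1) (hbig : 102 ≤ left) :
    aInner L (count, left, h, true, false) h = (count, left - 1, h, true, false) := by
  simp only [aInner]
  rw [if_neg (by simp), if_pos hh, if_neg (by simp), if_pos (by simp),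
      if_pos (by exact ⟨by omega, by omega⟩)]

theorem foldl_eq_big (L : Int) (k : Nat) : ∀ (count left h : Int), h ≠ -1 →
    102 + (k : Int) ≤ left →
    (List.replicate k h).foldl (aInner L) (count, left, h, true, false)
      = (count, left - (k : Int), h, true, false) := by
  induction k with
  | zero => intro count left h _ _; simp
  | succ k ih =>
    intro count left h hh hbig
    rw [List.replicate_succ, List.foldl_cons, aInner_eq_big L count left h hh (by push_cast at hbig; omega),
        ih _ _ _ hh (by push_cast at hbig ⊢; omega)]
    simp [Prod.mk.injEq]
    push_cast; omega



-- closed form for the machine state after the equal-cell phase of one run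
theorem exit_state (L : Int) (r : Nat) (hr : 1 ≤ r) (h count left : Int) (hh : h ≠ -1) (down : Bool)
    (HL : L ≤ 101 ∨ 102 + (r : Int) ≤ L)
    (hd : down = true → count = 0 ∧ left = L - 1)
    (hnd : down = false → count = 1 ∧ (left = 101 ∨ left ≤ 0)) :
    ∃ ec el, (List.replicate (r - 1) h).foldl (aInner L) (count, left, h, true, false) = (ec, el, h, true, false)
      ∧ ((el ≠ 101 ∧ 0 < el) ↔ (down = true ∧ ((0 < L ∧ (r : Int) < L) ∨ 102 + (r : Int) ≤ L)))
      ∧ (¬(el ≠ 101 ∧ 0 < el) → (el = 101 ∨ el ≤ 0))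
      ∧ (down = false → ec = (r : Int))
      ∧ (down = true → ((L ≤ 0 → ec = (r : Int) - 1) ∧ (0 < L → ¬(el ≠ 101 ∧ 0 < el) → ec = (r : Int) - L))) := by
  have hrc : ((r - 1 : Nat) : Int) = (r : Int) - 1 := by omega
  cases down with
  | false =>
    obtain ⟨hc, hnp⟩ := hnd rfl
    subst hc
    refine ⟨1 + ((r - 1 : Nat) : Int), left, foldl_eq_np L (r - 1) 1 left h hh hnp, ?_, ?_, ?_, ?_⟩
    · constructor
      · intro hp
        rcases hnp with h1 | h1
        · exact absurd h1 hp.1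
        · exact absurd hp.2 (by omega)
      · intro hp; exact absurd hp.1 (by simp)
    · intro _; exact hnp
    · intro _; omega
    · intro hx; exact absurd hx (by simp)
  | true =>
    obtain ⟨hc, hl⟩ := hd rfl
    subst hc; subst hl
    rcases HL with hL101 | hbig
    · rcases (by omega : L ≤ 0 ∨ 0 < L) with hL0 | hL1
      · refine ⟨0 + ((r - 1 : Nat) : Int), L - 1,
          foldl_eq_np L (r - 1) 0 (L - 1) h hh (Or.inr (by omega)), ?_, ?_, ?_, ?_⟩
        · constructor
          · intro hp; exact absurd hp (by simp; omega)
          · rintro ⟨-, hor⟩; omega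
        · intro _; right; omega
        · intro hx; exact absurd hx (by simp)
        · intro _; exact ⟨fun _ => by omega, fun h0 _ => by omega⟩
      · have := foldl_eq_pend L (r - 1) 0 (L - 1) h hh (by omega) (by omega)
        refine ⟨_, _, this, ?_, ?_, ?_, ?_⟩
        · rw [hrc]
          constructor
          · intro hp; refine ⟨rfl, Or.inl ⟨hL1, ?_⟩⟩; omega
          · rintro ⟨-, hor⟩
            rcases hor with ⟨-, hrL⟩ | hbig2
            · constructor <;> [omega; omega]
            · omega
        · intro hnp2; right; rw [hrc]; omega
        · intro hx; exact absurd hx (by simp)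
        · intro _
          refine ⟨fun h0 => by omega, fun h0 hnp2 => ?_⟩
          rw [hrc] at hnp2 ⊢
          omega
    · have := foldl_eq_big L (r - 1) 0 (L - 1) h hh (by omega)
      refine ⟨_, _, this, ?_, ?_, ?_, ?_⟩
      · rw [hrc]
        constructor
        · intro _; exact ⟨rfl, Or.inr hbig⟩
        · intro _; constructor <;> omega
      · intro hnp2; rw [hrc] at hnp2; omega
      · intro hx; exact absurd hx (by simp)
      · intro _
        refine ⟨fun h0 => by omega, fun h0 hnp2 => ?_⟩
        rw [hrc] at hnp2
        omega

-- evaluation forms of bCheck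
theorem bCheck_single (L : Int) (down : Bool) (h len : Int) :
    bCheck L down [(h, len)] = !(len < if down then L else 0) := by
  cases down <;> rfl

theorem bCheck_cons (L : Int) (down : Bool) (h len nh m : Int) (rest : List (Int × Int)) :
    bCheck L down ((h, len) :: (nh, m) :: rest)
      = if (h - nh).natAbs ≠ 1 then false
        else if len < (if down then L else 0) + (if nh > h then L else 0) then false
        else bCheck L (h > nh) ((nh, m) :: rest) := by
  cases down <;> rfl

-- main simulation: machine over the flattened runs = bCheck over the runs
theorem main_sim (L : Int) : ∀ (R : List (Int × Nat)) (h : Int) (r : Nat) (down : Bool) (count left : Int),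
    h ≠ -1 → (∀ p ∈ R, p.1 ≠ -1) → 1 ≤ r → (∀ p ∈ R, 1 ≤ p.2) →
    List.IsChain (fun p q : Int × Nat => p.1 ≠ q.1) ((h, r) :: R) →
    (L ≤ 101 ∨ 102 + ((r : Int) + ((flatR R).length : Int)) ≤ L) →
    (down = true → count = 0 ∧ left = L - 1) →
    (down = false → count = 1 ∧ (left = 101 ∨ left ≤ 0)) →
    finalize ((List.replicate (r - 1) h ++ flatR R).foldl (aInner L) (count, left, h, true, false))
      = bCheck L down ((h, (r : Int)) :: toRuns R) := by
  intro R
  induction R with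
  | nil =>
    intro h r down count left hh _ hr _ _ HL hd hnd
    simp only [flatR, List.length_nil, Nat.cast_zero, add_zero] at HL
    obtain ⟨ec, el, hfold, hpend, hnp, hecf, hect⟩ := exit_state L r hr h count left hh down HL hd hnd
    have hr' : (1 : Int) ≤ (r : Int) := by exact_mod_cast hr
    rw [show List.replicate (r - 1) h ++ flatR [] = List.replicate (r - 1) h from by simp [flatR],
        hfold, show toRuns [] = ([] : List (Int × Int)) from rfl, bCheck_single]
    simp only [finalize]
    by_cases hpd : el ≠ 101 ∧ 0 < el
    · rw [if_pos hpd]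
      obtain ⟨hdt, hor⟩ := hpend.mp hpd
      have hrL : (r : Int) < L := by rcases hor with ⟨_, x⟩ | x <;> omega
      rw [hdt]
      simp [hrL]
    · rw [if_neg hpd]
      cases down with
      | false => have hn : ¬((r : Int) < 0) := by omega
                 simp [hn]
      | true =>
        have hX : ¬((0 < L ∧ (r : Int) < L) ∨ 102 + (r : Int) ≤ L) :=
          fun x => hpd (hpend.mpr ⟨rfl, x⟩)
        have : ¬((r : Int) < L) := by omega
        simp [this]
  | cons p R' ih =>
    obtain ⟨h2, r2⟩ := p
    intro h r down count left hh hR hr hRpos hchain HL hd hnd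
    obtain ⟨k, rfl⟩ : ∃ k, r2 = k + 1 := ⟨r2 - 1, by
      have := hRpos (h2, r2) (List.mem_cons_self)
      omega⟩
    have hh2 : h2 ≠ -1 := hR (h2, k + 1) List.mem_cons_self
    have hlen : ((flatR ((h2, k + 1) :: R')).length : Int) = ((k : Int) + 1) + ((flatR R').length : Int) := by
      simp [flatR]
    have HLr : L ≤ 101 ∨ 102 + (r : Int) ≤ L := by
      rcases HL with a | a
      · exact Or.inl a
      · right; omega
    have HLnext : L ≤ 101 ∨ 102 + (((k + 1 : Nat) : Int) + ((flatR R').length : Int)) ≤ L := by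
      rcases HL with a | a
      · exact Or.inl a
      · right; rw [hlen] at a; push_cast; omega
    obtain ⟨ec, el, hfold, hpend, hnp, hecf, hect⟩ := exit_state L r hr h count left hh down HLr hd hnd
    have hr' : (1 : Int) ≤ (r : Int) := by exact_mod_cast hr
    obtain ⟨hne, hchain'⟩ := List.isChain_cons_cons.mp hchain
    have hne' : h ≠ h2 := by simpa using hne
    have hRt : ∀ q ∈ R', (q : Int × Nat).1 ≠ -1 := fun q hq => hR q (List.mem_cons_of_mem _ hq)
    have hRpt : ∀ q ∈ R', 1 ≤ (q : Int × Nat).2 := fun q hq => hRpos q (List.mem_cons_of_mem _ hq)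
    have hflat : flatR ((h2, k + 1) :: R') = h2 :: (List.replicate k h2 ++ flatR R') := by
      simp [flatR, List.replicate_succ]
    rw [hflat, List.foldl_append, hfold, List.foldl_cons]
    rw [show toRuns ((h2, k + 1) :: R') = (h2, ((k + 1 : Nat) : Int)) :: toRuns R' from by simp [toRuns]]
    by_cases hd1 : (h - h2).natAbs = 1
    · have hserv : h2 = h - 1 ∨ h2 = h + 1 := by omega
      by_cases hpd : el ≠ 101 ∧ 0 < el
      · -- pending ramp at the transition: A breaks, B's length check fails
        have hstep : aInner L (ec, el, h, true, false) h2 = (ec, el, h, false, true) := by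
          simp only [aInner]
          rw [if_neg (by simp), if_pos hh, if_pos hd1, if_pos hpd]
        rw [hstep, foldl_broken, bCheck_cons, if_neg (by simpa using hd1)]
        obtain ⟨hdt, hor⟩ := hpend.mp hpd
        subst hdt
        have hlt : (r : Int) < (if (true : Bool) then L else 0) + (if h2 > h then L else 0) := by
          rw [show (if (true : Bool) then L else 0) = L from by simp]
          split_ifs <;> rcases hor with ⟨x, y⟩ | x <;> omega
        rw [if_pos hlt]
        simp [finalize]
      · have hnel := hnp hpd
        have hX : down = true → ¬((0 < L ∧ (r : Int) < L) ∨ 102 + (r : Int) ≤ L) :=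
          fun hdt x => hpd (hpend.mpr ⟨hdt, x⟩)
        rcases hserv with hdn | hup
        · -- down-step
          have hgt : h > h2 := by omega
          have hstep : aInner L (ec, el, h, true, false) h2 = (0, L - 1, h2, true, false) := by
            simp only [aInner]
            rw [if_neg (by simp), if_pos hh, if_pos hd1, if_neg hpd, if_pos hgt]
          rw [hstep]
          have IH := ih h2 (k + 1) true 0 (L - 1) hh2 hRt (by omega) hRpt hchain' HLnext
            (fun _ => ⟨rfl, rfl⟩) (by intro hx; exact absurd hx (by simp))
          rw [show (k + 1) - 1 = k from by omega] at IH
          rw [IH, bCheck_cons, if_neg (by simpa using hd1), if_neg (show ¬(h2 > h) by omega)]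
          have hnlt : ¬((r : Int) < (if down then L else 0) + 0) := by
            cases down with
            | false =>
              rw [show (if (false : Bool) then L else 0) = 0 from by simp]
              omega
            | true =>
              have := hX rfl
              rw [show (if (true : Bool) then L else 0) = L from by simp]
              omega
          rw [if_neg hnlt, decide_eq_true hgt]
        · -- up-step
          have hgt : h2 > h := by omega
          by_cases hcl : ec < L
          · -- count too small: A breaks, B's length check fails
            have hstep : aInner L (ec, el, h, true, false) h2 = (ec, el, h, false, true) := by
              simp only [aInner]
              rw [if_neg (by simp), if_pos hh, if_pos hd1, if_neg hpd,
                  if_neg (show ¬(h > h2) by omega), if_pos hcl]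
            rw [hstep, foldl_broken, bCheck_cons, if_neg (by simpa using hd1)]
            have hlt : (r : Int) < (if down then L else 0) + (if h2 > h then L else 0) := by
              rw [if_pos hgt]
              cases down with
              | false =>
                have := hecf rfl
                rw [show (if (false : Bool) then L else 0) = 0 from by simp]
                omega
              | true =>
                obtain ⟨hc0, hcL⟩ := hect rfl
                rcases (by omega : L ≤ 0 ∨ 0 < L) with hL0 | hL1
                · exact absurd hcl (by have := hc0 hL0; omega)
                · have := hcL hL1 hpd
                  rw [show (if (true : Bool) then L else 0) = L from by simp]
                  omega
            rw [if_pos hlt]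
            simp [finalize]
          · have hstep : aInner L (ec, el, h, true, false) h2 = (1, el, h2, true, false) := by
              simp only [aInner]
              rw [if_neg (by simp), if_pos hh, if_pos hd1, if_neg hpd,
                  if_neg (show ¬(h > h2) by omega), if_neg hcl]
            rw [hstep]
            have IH := ih h2 (k + 1) false 1 el hh2 hRt (by omega) hRpt hchain' HLnext
              (by intro hx; exact absurd hx (by simp)) (fun _ => ⟨rfl, hnel⟩)
            rw [show (k + 1) - 1 = k from by omega] at IH
            rw [IH, bCheck_cons, if_neg (by simpa using hd1)]
            have hnlt : ¬((r : Int) < (if down then L else 0) + (if h2 > h then L else 0)) := by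
              rw [if_pos hgt]
              cases down with
              | false =>
                have := hecf rfl
                rw [show (if (false : Bool) then L else 0) = 0 from by simp]
                omega
              | true =>
                obtain ⟨hc0, hcL⟩ := hect rfl
                rcases (by omega : L ≤ 0 ∨ 0 < L) with hL0 | hL1
                · rw [show (if (true : Bool) then L else 0) = L from by simp]
                  omega
                · have := hcL hL1 hpd
                  rw [show (if (true : Bool) then L else 0) = L from by simp]
                  omega
            rw [if_neg hnlt, decide_eq_false (show ¬(h > h2) by omega)]
    · -- |h - h2| ≥ 2: both invalid
      have hstep : aInner L (ec, el, h, true, false) h2 = (ec, el, h, false, true) := by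
        simp only [aInner]
        rw [if_neg (by simp), if_pos hh, if_neg hd1,
            if_neg (show ¬((h - h2).natAbs = 0) by omega)]
      rw [hstep, foldl_broken, bCheck_cons, if_pos hd1]
      simp [finalize]

-- per-row core: A's machine on a cell list c = B's runs check, when -1 ∉ c and L avoids the sentinel band
theorem row_core (L : Int) (c : List Int) (hc : (-1 : Int) ∉ c)
    (HL : L ≤ 101 ∨ 102 + (c.length : Int) ≤ L) :
    finalize (c.foldl (aInner L) (1, 101, -1, true, false))
      = bCheck L false ((c.foldl bRle []).reverse) := by
  cases c with
  | nil => simp [finalize, bCheck]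
  | cons x t =>
    have hx : x ≠ -1 := fun hxe => hc (by simp [hxe])
    have hfoldr : List.foldl bRle [] (x :: t) = (toRuns (lrleabs x 1 t)).reverse := by
      rw [List.foldl_cons, show bRle [] x = [(x, ((1 : Nat) : Int))] from by simp [bRle],
          rle_fold t x 1 []]
      simp
    rw [hfoldr, List.reverse_reverse, List.foldl_cons,
        show aInner L (1, 101, -1, true, false) x = (1, 101, x, true, false) from by simp [aInner]]
    obtain ⟨r', R, hR, hle⟩ := lrleabs_head t x 1
    have hflat := lrleabs_flat t x 1
    rw [hR] at hflat
    simp only [flatR, List.replicate_one, List.singleton_append] at hflat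
    have ht : t = List.replicate (r' - 1) x ++ flatR R := by
      have hrep : List.replicate r' x = x :: List.replicate (r' - 1) x := by
        rw [show r' = (r' - 1) + 1 from by omega, List.replicate_succ]
        simp
      rw [hrep] at hflat
      have h2 : List.replicate (r' - 1) x ++ flatR R = t := by simpa using hflat
      exact h2.symm
    have hR1 : ∀ p ∈ R, (p : Int × Nat).1 ≠ -1 := by
      intro p hp
      rcases lrleabs_mem_fst t x 1 p (by rw [hR]; exact List.mem_cons_of_mem _ hp) with h1 | h1
      · rw [h1]; exact hx
      · intro he; exact hc (by rw [he] at h1; simp [h1])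
    have hRp : ∀ p ∈ R, 1 ≤ (p : Int × Nat).2 := fun p hp =>
      lrleabs_pos t x 1 le_rfl p (by rw [hR]; exact List.mem_cons_of_mem _ hp)
    have hch : List.IsChain (fun p q : Int × Nat => p.1 ≠ q.1) ((x, r') :: R) := by
      have := lrleabs_chain t x 1
      rwa [hR] at this
    have hlt : t.length = (r' - 1) + (flatR R).length := by rw [ht]; simp
    have HL' : L ≤ 101 ∨ 102 + ((r' : Int) + ((flatR R).length : Int)) ≤ L := by
      rcases HL with a | a
      · exact Or.inl a
      · right
        have hcl : (x :: t).length = 1 + t.length := by simp; omega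
        omega
    have hms := main_sim L R x r' false 1 101 hx hR1 hle hRp hch HL'
      (by intro hxx; exact absurd hxx (by simp)) (fun _ => ⟨rfl, Or.inl rfl⟩)
    rw [hR, ht, hms]
    simp [toRuns]

-- ===== VERDICT (by name: the statement is the Claim_ definition above) =====
theorem count_slope_col_spec : Claim_equal_count_slope_col := by
  unfold Claim_equal_count_slope_col
  intro N L stairs _ hpre
  obtain ⟨hband, hsh, hrow⟩ := hpre
  unfold Spec_count_slope_col count_slope_col count_slope_col_alt
  apply PySem.List.foldl_congr_mem
  intro answer row hmemr
  rw [PySem.List.mem_pyRange_one] at hmemr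
  obtain ⟨hr0, hrN⟩ := hmemr
  have hrlen : row.toNat < stairs.length := by omega
  have hcells : PySem.List.pyGetD stairs row [] = stairs[row.toNat] :=
    PySem.List.pyGetD_eq_getElem stairs [] hr0 (by omega)
  have htklen : row.toNat < (stairs.take N.toNat).length := by
    simp [List.length_take]
    omega
  have hmem : stairs[row.toNat] ∈ stairs.take N.toNat := by
    have h1 : (stairs.take N.toNat)[row.toNat] = stairs[row.toNat] := List.getElem_take
    rw [← h1]
    exact List.getElem_mem htklen
  obtain ⟨hrl, hneg⟩ := hrow _ hmem
  have hclen : (stairs[row.toNat].take N.toNat).length = N.toNat := by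
    simp [List.length_take]
    omega
  -- B side: the slice is take N
  have hslice : PySem.List.slice (PySem.List.pyGetD stairs row []) none (some N)
      = stairs[row.toNat].take N.toNat := by
    rw [hcells, show N = ((N.toNat : Nat) : Int) from by omega]
    exact PySem.List.slice_to_natCast _ _
  -- A side: the indexed scan is a fold over take N
  have hA : (PySem.List.pyRange 0 N 1).foldl
        (fun st col => aInner L st (PySem.List.pyGetD (PySem.List.pyGetD stairs row []) col 0))
        ((1 : Int), (101 : Int), (-1 : Int), true, false)
      = (stairs[row.toNat].take N.toNat).foldl (aInner L) ((1 : Int), (101 : Int), (-1 : Int), true, false) := by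
    rw [PySem.List.foldl_congr_mem (g := fun st col =>
          aInner L st (PySem.List.pyGetD (stairs[row.toNat].take N.toNat) col 0))]
    · have key : ∀ (cl : List Int), (cl.length : Int) = N →
          List.foldl (fun st col => aInner L st (PySem.List.pyGetD cl col 0))
            ((1 : Int), (101 : Int), (-1 : Int), true, false) (PySem.List.pyRange 0 N 1)
          = cl.foldl (aInner L) ((1 : Int), (101 : Int), (-1 : Int), true, false) := by
        intro cl hcl
        rw [← hcl]
        exact PySem.List.foldl_pyRange_zero_pyGetD' cl 0 (aInner L) _
      exact key _ (by rw [hclen]; omega)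
    · intro st col hcol
      rw [PySem.List.mem_pyRange_one] at hcol
      congr 1
      rw [hcells, PySem.List.pyGetD_eq_getElem (stairs[row.toNat]) 0 hcol.1 (by omega),
          PySem.List.pyGetD_eq_getElem (stairs[row.toNat].take N.toNat) 0 hcol.1 (by rw [hclen]; omega)]
      exact (List.getElem_take).symm
  rw [hA, hslice]
  have hcore := row_core L (stairs[row.toNat].take N.toNat)
    (by exact hneg)
    (by rcases (by omega : L ≤ 101 ∨ 102 + N ≤ L) with a | a
        · exact Or.inl a
        · right; rw [hclen]; omega)
  rcases hfin : (stairs[row.toNat].take N.toNat).foldl (aInner L) ((1 : Int), (101 : Int), (-1 : Int), true, false)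
    with ⟨ec, el, ep, es, eb⟩
  rw [hfin] at hcore
  simp only [finalize] at hcore
  simp [hcore]
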